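-- pv_equiv track=rewrite | github.com/UberMayinch/Algorithmic-Programming | cf/964/F4.py | count_valid_subsequences
-- ===== SOURCE A (Python) =====
-- MOD = 10**9 + 7
--
-- def count_valid_subsequences(binary_sequence, k):
--     n = len(binary_sequence)
--     count_ones = binary_sequence.count(1)
--
--     min_ones = (k + 1) // 2
--
--     dp = [[0] * (count_ones + 1) for _ in range(k + 1)]
--     dp[0][0] = 1
--
--     for bit in binary_sequence:
--         if bit == 1:
--             for i in range(k, 0, -1):
--                 for j in range(count_ones, 0, -1):
--                     dp[i][j] = (dp[i][j] + dp[i - 1][j - 1]) % MOD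
--         else:
--             for i in range(k, 0, -1):
--                 for j in range(count_ones + 1):
--                     dp[i][j] = (dp[i][j] + dp[i - 1][j]) % MOD
--
--     result = sum(dp[k][j] for j in range(min_ones, count_ones + 1)) % MOD
--
--     return result
-- ===== SOURCE B (Python) =====
-- MOD = 10**9 + 7
--
-- def _binom_row(n):
--     # exact binomial coefficients C(n, 0..n), built by the multiplicative rule
--     row = [1]
--     c = 1
--     for t in range(n):
--         c = c * (n - t) // (t + 1)
--         row.append(c)
--     return row
--
-- def count_valid_subsequences(binary_sequence, k):
--     ones = binary_sequence.count(1)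
--     zeros = len(binary_sequence) - ones
--     min_ones = (k + 1) // 2
--     row_ones = _binom_row(ones)
--     row_zeros = _binom_row(zeros)
--     total = 0
--     for j in range(max(min_ones, 0), ones + 1):
--         if 0 <= k - j <= zeros:
--             total += (row_ones[j] % MOD) * (row_zeros[k - j] % MOD)
--     return total % MOD
-- ===== Notes on version B (the rewrite author's own statement) =====
-- stated objective: faster
-- what changed: Replaces the in-place (k+1)x(ones+1) knapsack DP updated once per element by the closed-form sum of C(ones,j)*C(zeros,k-j) mod p over j >= ceil(k/2), with the two binomial rows built once by the multiplicative rule.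
import Mathlib
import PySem

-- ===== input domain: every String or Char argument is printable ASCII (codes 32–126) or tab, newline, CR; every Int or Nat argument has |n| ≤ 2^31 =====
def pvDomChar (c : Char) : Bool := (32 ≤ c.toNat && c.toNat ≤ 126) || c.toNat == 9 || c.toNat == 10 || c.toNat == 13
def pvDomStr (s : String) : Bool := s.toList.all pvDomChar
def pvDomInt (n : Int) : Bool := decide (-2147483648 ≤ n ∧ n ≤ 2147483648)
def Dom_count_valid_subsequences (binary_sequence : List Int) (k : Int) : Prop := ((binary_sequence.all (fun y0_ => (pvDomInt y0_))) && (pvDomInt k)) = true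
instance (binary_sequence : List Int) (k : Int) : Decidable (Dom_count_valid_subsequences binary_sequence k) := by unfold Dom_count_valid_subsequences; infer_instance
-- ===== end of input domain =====

-- B replaces A's in-place (k+1)×(ones+1) subsequence DP by the closed-form sum of
-- C(ones,j)*C(zeros,k-j) mod p with multiplicatively built binomial rows (objective: faster).

-- ===== PORT A =====
def pvMOD : Int := 1000000007

-- dp[i][j] read/write on the table (a Python list of lists = Lean Array of Arrays);
-- exact for the nonnegative in-range indices A uses once 0 ≤ k
def pvGetDP (dp : Array (Array Int)) (i j : Int) : Int :=
  (dp.getD i.toNat #[]).getD j.toNat 0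

def pvSetDP (dp : Array (Array Int)) (i j : Int) (v : Int) : Array (Array Int) :=
  dp.set! i.toNat ((dp.getD i.toNat #[]).set! j.toNat v)

def count_valid_subsequences (binary_sequence : List Int) (k : Int) : Int :=
  let countOnes : Int := (PySem.List.count binary_sequence 1 : Int)
  let minOnes : Int := PySem.Int.floordiv (k + 1) 2
  let dp0 : Array (Array Int) :=
    Array.replicate (k + 1).toNat (Array.replicate (countOnes + 1).toNat 0)
  let dp1 := pvSetDP dp0 0 0 1
  let dpF := binary_sequence.foldl (fun dp bit =>
    if bit == 1 then
      (PySem.List.pyRange k 0 (-1)).foldl (fun dp i =>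
        (PySem.List.pyRange countOnes 0 (-1)).foldl (fun dp j =>
          pvSetDP dp i j (PySem.Int.mod (pvGetDP dp i j + pvGetDP dp (i - 1) (j - 1)) pvMOD)) dp) dp
    else
      (PySem.List.pyRange k 0 (-1)).foldl (fun dp i =>
        (PySem.List.pyRange 0 (countOnes + 1) 1).foldl (fun dp j =>
          pvSetDP dp i j (PySem.Int.mod (pvGetDP dp i j + pvGetDP dp (i - 1) j) pvMOD)) dp) dp) dp1
  PySem.Int.mod
    ((PySem.List.pyRange minOnes (countOnes + 1) 1).foldl (fun s j => s + pvGetDP dpF k j) 0)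
    pvMOD

-- ===== PORT B =====
-- exact binomial coefficients C(n, 0..n), built by the multiplicative rule
def pvBinomRow (n : Int) : List Int :=
  ((PySem.List.pyRange 0 n 1).foldl
    (fun rc t =>
      let c := PySem.Int.floordiv (rc.2 * (n - t)) (t + 1)
      (rc.1 ++ [c], c))
    ([1], 1)).1

def count_valid_subsequences_alt (binary_sequence : List Int) (k : Int) : Int :=
  let ones : Int := (PySem.List.count binary_sequence 1 : Int)
  let zeros : Int := (binary_sequence.length : Int) - ones
  let minOnes : Int := PySem.Int.floordiv (k + 1) 2
  let rowOnes := pvBinomRow ones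
  let rowZeros := pvBinomRow zeros
  let total := (PySem.List.pyRange (max minOnes 0) (ones + 1) 1).foldl
    (fun s j =>
      if 0 ≤ k - j ∧ k - j ≤ zeros then
        s + PySem.Int.mod (rowOnes.getD j.toNat 0) pvMOD
              * PySem.Int.mod (rowZeros.getD (k - j).toNat 0) pvMOD
      else s) 0
  PySem.Int.mod total pvMOD

-- ===== PRECONDITION & SPEC =====
-- Pre_ excludes exactly k < 0, where Python A raises IndexError (dp has no rows).
def Pre_count_valid_subsequences (binary_sequence : List Int) (k : Int) : Prop := 0 ≤ k
instance (binary_sequence : List Int) (k : Int) : Decidable (Pre_count_valid_subsequences binary_sequence k) := by unfold Pre_count_valid_subsequences; infer_instance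

def pvWitness_count_valid_subsequences : List Int × Int := ([1, 0, 1, 1, 0], 3)

def Spec_count_valid_subsequences (binary_sequence : List Int) (k : Int) (out : Int) : Prop := out = count_valid_subsequences_alt binary_sequence k
instance (binary_sequence : List Int) (k : Int) (out : Int) : Decidable (Spec_count_valid_subsequences binary_sequence k out) := by unfold Spec_count_valid_subsequences; infer_instance

-- ===== CLAIM (what is proved, stated in full; the proofs are below) =====
def Claim_equal_count_valid_subsequences : Prop := ∀ (binary_sequence : List Int) (k : Int), Dom_count_valid_subsequences binary_sequence k → Pre_count_valid_subsequences binary_sequence k → Spec_count_valid_subsequences binary_sequence k (count_valid_subsequences binary_sequence k)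


-- ===== LEMMAS AND PROOFS =====

-- list-level model of the dp table, used only by the proofs
def pvGetL (dp : List (List Int)) (i j : Int) : Int :=
  (dp.getD i.toNat []).getD j.toNat 0

def pvSetL (dp : List (List Int)) (i j : Int) (v : Int) : List (List Int) :=
  dp.set i.toNat ((dp.getD i.toNat []).set j.toNat v)

def pvConv (t : List (List Int)) : Array (Array Int) := (t.map List.toArray).toArray

theorem pvArrGetD {α : Type} [Inhabited α] (l : List α) (n : Nat) (d : α) :
    (l.toArray).getD n d = l.getD n d := by
  unfold Array.getD List.getD
  split
  · rename_i h
    simp at h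
    simp [List.getElem?_eq_getElem h]
  · rename_i h
    simp at h
    simp [List.getElem?_eq_none h]

theorem pvConv_row (t : List (List Int)) (n : Nat) :
    (pvConv t).getD n #[] = (t.getD n []).toArray := by
  unfold pvConv
  rw [pvArrGetD]
  by_cases h : n < t.length
  · rw [List.getD_eq_getElem _ _ (by simpa using h), List.getD_eq_getElem _ _ h]
    simp
  · rw [List.getD_eq_default _ _ (by simpa using (by omega : t.length ≤ n)),
        List.getD_eq_default _ _ (by omega)]

theorem pvConv_get (t : List (List Int)) (i j : Int) :
    pvGetDP (pvConv t) i j = pvGetL t i j := by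
  unfold pvGetDP pvGetL
  rw [pvConv_row, pvArrGetD]

theorem pvConv_set (t : List (List Int)) (i j : Int) (v : Int) :
    pvSetDP (pvConv t) i j v = pvConv (pvSetL t i j v) := by
  unfold pvSetDP pvSetL
  rw [pvConv_row]
  unfold pvConv
  simp [Array.set!_eq_setIfInBounds, List.map_set]

-- a fold on the array table is the pvConv-image of the same fold on the list table
theorem pvConv_fold (rng : List Int)
    (F : List (List Int) → Int → List (List Int))
    (G : Array (Array Int) → Int → Array (Array Int))
    (hcomm : ∀ t x, G (pvConv t) x = pvConv (F t x)) :
    ∀ t, rng.foldl G (pvConv t) = pvConv (rng.foldl F t) := by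
  induction rng with
  | nil => intro t; rfl
  | cons x r ih =>
    intro t
    simp only [List.foldl_cons]
    rw [hcomm t x, ih]
theorem pvM_pos : (0:Int) < pvMOD := by decide

theorem pvMod_eq (x : Int) : PySem.Int.mod x pvMOD = x % pvMOD :=
  PySem.Int.mod_eq_emod_of_pos pvM_pos

-- binomial coefficient as an Int
def pvC (n r : Nat) : Int := (n.choose r : Int)

-- the table A's dp holds after seeing o ones and z non-ones
def pvE (o z : Nat) (i j : Nat) : Int :=
  if j ≤ i then (pvC o j * pvC z (i - j)) % pvMOD else 0

-- (K+1)×(O+1) table given by an entry function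
def pvMk (K O : Nat) (g : Nat → Nat → Int) : List (List Int) :=
  (List.range (K + 1)).map (fun i => (List.range (O + 1)).map (fun j => g i j))

theorem pvMk_congr (K O : Nat) (g g' : Nat → Nat → Int)
    (h : ∀ i ≤ K, ∀ j ≤ O, g i j = g' i j) : pvMk K O g = pvMk K O g' := by
  unfold pvMk
  refine List.map_congr_left (fun i hi => ?_)
  refine List.map_congr_left (fun j hj => ?_)
  exact h i (by simpa using Nat.lt_succ_iff.mp (List.mem_range.mp hi))
          j (by simpa using Nat.lt_succ_iff.mp (List.mem_range.mp hj))

theorem pvMapRange_getD (n : Nat) (f : Nat → Int) (i : Nat) (hi : i < n) :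
    ((List.range n).map f).getD i 0 = f i := by
  rw [List.getD_eq_getElem _ _ (by simpa using hi)]
  simp

theorem pvMk_getD (K O i j : Nat) (g : Nat → Nat → Int) (hi : i ≤ K) (hj : j ≤ O) :
    pvGetL (pvMk K O g) (i : Int) (j : Int) = g i j := by
  unfold pvGetL pvMk
  rw [Int.toNat_natCast, Int.toNat_natCast]
  rw [show ((List.range (K+1)).map (fun i => (List.range (O+1)).map (fun j => g i j))).getD i []
       = (List.range (O+1)).map (fun j => g i j) by
       rw [List.getD_eq_getElem _ _ (by simpa using Nat.lt_succ_of_le hi)]; simp]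
  exact pvMapRange_getD _ _ _ (by omega)

theorem pvSetMapRange (n : Nat) (f : Nat → Int) (i : Nat) (v : Int) (hi : i < n) :
    ((List.range n).map f).set i v
      = (List.range n).map (fun t => if t = i then v else f t) := by
  apply List.ext_getElem
  · simp
  · intro t h1 h2
    simp only [List.getElem_set, List.getElem_map, List.getElem_range]
    split_ifs with h3 h4 h5
    · rfl
    · exact absurd h3.symm h4
    · exact absurd h5.symm h3
    · rfl

theorem pvSetMapRangeL (n : Nat) (f : Nat → List Int) (i : Nat) (v : List Int) (hi : i < n) :
    ((List.range n).map f).set i v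
      = (List.range n).map (fun t => if t = i then v else f t) := by
  apply List.ext_getElem
  · simp
  · intro t h1 h2
    simp only [List.getElem_set, List.getElem_map, List.getElem_range]
    split_ifs with h3 h4 h5
    · rfl
    · exact absurd h3.symm h4
    · exact absurd h5.symm h3
    · rfl

theorem pvMk_set (K O i j : Nat) (g : Nat → Nat → Int) (v : Int) (hi : i ≤ K) (hj : j ≤ O) :
    pvSetL (pvMk K O g) (i : Int) (j : Int) v
      = pvMk K O (fun i' j' => if i' = i ∧ j' = j then v else g i' j') := by
  unfold pvSetL pvMk
  rw [Int.toNat_natCast, Int.toNat_natCast]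
  rw [show ((List.range (K+1)).map (fun i => (List.range (O+1)).map (fun j => g i j))).getD i []
       = (List.range (O+1)).map (fun j => g i j) by
       rw [List.getD_eq_getElem _ _ (by simpa using Nat.lt_succ_of_le hi)]; simp]
  rw [pvSetMapRange _ _ _ _ (by omega), pvSetMapRangeL _ _ _ _ (by omega)]
  refine List.map_congr_left (fun i' hi' => ?_)
  by_cases h : i' = i
  · subst h
    rw [if_pos rfl]
    refine List.map_congr_left (fun j' hj' => ?_)
    by_cases h2 : j' = j <;> simp [h2]
  · simp [h]

theorem pvMk_getD' (K O : Nat) (g : Nat → Nat → Int) (ii jj : Int)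
    (h1 : 0 ≤ ii) (h2 : ii ≤ (K : Int)) (h3 : 0 ≤ jj) (h4 : jj ≤ (O : Int)) :
    pvGetL (pvMk K O g) ii jj = g ii.toNat jj.toNat := by
  obtain ⟨a, rfl⟩ : ∃ a : Nat, ii = (a : Int) := ⟨ii.toNat, by omega⟩
  obtain ⟨b, rfl⟩ : ∃ b : Nat, jj = (b : Int) := ⟨jj.toNat, by omega⟩
  rw [Int.toNat_natCast, Int.toNat_natCast]
  exact pvMk_getD K O a b g (by omega) (by omega)

theorem pvMk_set' (K O : Nat) (g : Nat → Nat → Int) (ii jj : Int) (v : Int)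
    (h1 : 0 ≤ ii) (h2 : ii ≤ (K : Int)) (h3 : 0 ≤ jj) (h4 : jj ≤ (O : Int)) :
    pvSetL (pvMk K O g) ii jj v
      = pvMk K O (fun i' j' => if i' = ii.toNat ∧ j' = jj.toNat then v else g i' j') := by
  obtain ⟨a, rfl⟩ : ∃ a : Nat, ii = (a : Int) := ⟨ii.toNat, by omega⟩
  obtain ⟨b, rfl⟩ : ∃ b : Nat, jj = (b : Int) := ⟨jj.toNat, by omega⟩
  rw [Int.toNat_natCast, Int.toNat_natCast]
  exact pvMk_set K O a b g v (by omega) (by omega)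

-- inner j-loop of the bit==1 branch, updating row i in place from row i-1
theorem pvInner1 (K O i : Nat) (hi1 : 1 ≤ i) (hiK : i ≤ K) :
    ∀ (m : Nat) (g : Nat → Nat → Int), m ≤ O →
    (PySem.List.pyRange (m : Int) 0 (-1)).foldl
      (fun dp j => pvSetL dp (i : Int) j
        (PySem.Int.mod (pvGetL dp (i : Int) j + pvGetL dp ((i : Int) - 1) (j - 1)) pvMOD))
      (pvMk K O g)
    = pvMk K O (fun i' j' =>
        if i' = i ∧ 1 ≤ j' ∧ j' ≤ m then
          PySem.Int.mod (g i j' + g (i - 1) (j' - 1)) pvMOD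
        else g i' j') := by
  intro m
  induction m with
  | zero =>
    intro g _
    rw [PySem.List.pyRange_neg_one_eq_nil (by norm_num)]
    simp only [List.foldl_nil]
    exact pvMk_congr _ _ _ _ (fun i' _ j' _ => by rw [if_neg (by omega)])
  | succ m ih =>
    intro g hm
    rw [PySem.List.pyRange_neg_one_cons (by exact_mod_cast Nat.succ_pos m)]
    simp only [List.foldl_cons]
    have e1 : ((m + 1 : Nat) : Int) - 1 = ((m : Nat) : Int) := by push_cast; ring
    rw [e1,
        pvMk_getD' K O g (i : Int) ((m+1 : Nat) : Int) (by omega) (by omega) (by omega) (by omega),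
        pvMk_getD' K O g ((i : Int) - 1) ((m : Nat) : Int) (by omega) (by omega) (by omega) (by omega),
        pvMk_set' K O g (i : Int) ((m+1 : Nat) : Int) _ (by omega) (by omega) (by omega) (by omega)]
    have t1 : ((i : Nat) : Int).toNat = i := by omega
    have t2 : (((i : Nat) : Int) - 1).toNat = i - 1 := by omega
    have t3 : (((m+1 : Nat)) : Int).toNat = m + 1 := by omega
    have t4 : ((m : Nat) : Int).toNat = m := by omega
    rw [t1, t2, t3, t4, ih _ (by omega)]
    refine pvMk_congr _ _ _ _ (fun i' hi' j' hj' => ?_)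
    by_cases hii : i' = i
    · by_cases hj1 : 1 ≤ j'
      · by_cases hjm : j' ≤ m
        · rw [if_pos ((⟨hii, hj1, hjm⟩ : i' = i ∧ 1 ≤ j' ∧ j' ≤ m)),
              if_pos ((⟨hii, hj1, by omega⟩ : i' = i ∧ 1 ≤ j' ∧ j' ≤ m + 1)),
              if_neg (by omega : ¬(i = i ∧ j' = m + 1)),
              if_neg (by omega : ¬(i - 1 = i ∧ j' - 1 = m + 1))]
        · by_cases hjm1 : j' = m + 1
          · subst hjm1
            rw [if_neg (by omega : ¬(i' = i ∧ 1 ≤ m + 1 ∧ m + 1 ≤ m)),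
                if_pos (⟨hii, rfl⟩ : i' = i ∧ m + 1 = m + 1),
                if_pos (⟨hii, by omega, by omega⟩ : i' = i ∧ 1 ≤ m + 1 ∧ m + 1 ≤ m + 1)]
            norm_num
          · rw [if_neg (by omega : ¬(i' = i ∧ 1 ≤ j' ∧ j' ≤ m)),
                if_neg (by omega : ¬(i' = i ∧ j' = m + 1)),
                if_neg (by omega : ¬(i' = i ∧ 1 ≤ j' ∧ j' ≤ m + 1))]
      · rw [if_neg (by omega : ¬(i' = i ∧ 1 ≤ j' ∧ j' ≤ m)),
            if_neg (by omega : ¬(i' = i ∧ j' = m + 1)),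
            if_neg (by omega : ¬(i' = i ∧ 1 ≤ j' ∧ j' ≤ m + 1))]
    · rw [if_neg (by omega : ¬(i' = i ∧ 1 ≤ j' ∧ j' ≤ m)),
          if_neg (by omega : ¬(i' = i ∧ j' = m + 1)),
          if_neg (by omega : ¬(i' = i ∧ 1 ≤ j' ∧ j' ≤ m + 1))]
-- inner j-loop of the else branch, updating row i in place from row i-1
theorem pvInner0 (K O i : Nat) (hi1 : 1 ≤ i) (hiK : i ≤ K) :
    ∀ (b : Nat) (g : Nat → Nat → Int), b ≤ O + 1 →
    (PySem.List.pyRange 0 (b : Int) 1).foldl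
      (fun dp j => pvSetL dp (i : Int) j
        (PySem.Int.mod (pvGetL dp (i : Int) j + pvGetL dp ((i : Int) - 1) j) pvMOD))
      (pvMk K O g)
    = pvMk K O (fun i' j' =>
        if i' = i ∧ j' < b then PySem.Int.mod (g i j' + g (i - 1) j') pvMOD
        else g i' j') := by
  intro b
  induction b with
  | zero =>
    intro g _
    rw [PySem.List.pyRange_one_eq_nil (by norm_num)]
    simp only [List.foldl_nil]
    exact pvMk_congr _ _ _ _ (fun i' _ j' _ => by rw [if_neg (by omega)])
  | succ b ih =>
    intro g hb
    have e1 : ((b + 1 : Nat) : Int) = ((b : Nat) : Int) + 1 := by push_cast; ring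
    rw [e1, PySem.List.pyRange_one_succ_right (by omega), List.foldl_append,
        ih _ (by omega)]
    simp only [List.foldl_cons, List.foldl_nil]
    rw [pvMk_getD' K O _ (i : Int) ((b : Nat) : Int) (by omega) (by omega) (by omega) (by omega),
        pvMk_getD' K O _ ((i : Int) - 1) ((b : Nat) : Int) (by omega) (by omega) (by omega) (by omega),
        pvMk_set' K O _ (i : Int) ((b : Nat) : Int) _ (by omega) (by omega) (by omega) (by omega)]
    have t1 : ((i : Nat) : Int).toNat = i := by omega
    have t2 : (((i : Nat) : Int) - 1).toNat = i - 1 := by omega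
    have t4 : ((b : Nat) : Int).toNat = b := by omega
    rw [t1, t2, t4]
    simp only []
    rw [if_neg (by simp : ¬(True ∧ b < b)), if_neg (by omega : ¬(i - 1 = i ∧ b < b))]
    refine pvMk_congr _ _ _ _ (fun i' hi' j' hj' => ?_)
    by_cases hii : i' = i
    · by_cases hjb : j' < b
      · rw [if_neg (by omega : ¬(i' = i ∧ j' = b)),
            if_pos (⟨hii, hjb⟩ : i' = i ∧ j' < b),
            if_pos (⟨hii, by omega⟩ : i' = i ∧ j' < b + 1)]
      · by_cases hjb1 : j' = b
        · subst hjb1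
          rw [if_pos (⟨hii, rfl⟩ : i' = i ∧ j' = j'),
              if_pos (⟨hii, by omega⟩ : i' = i ∧ j' < j' + 1)]
        · rw [if_neg (by omega : ¬(i' = i ∧ j' = b)),
              if_neg (by omega : ¬(i' = i ∧ j' < b)),
              if_neg (by omega : ¬(i' = i ∧ j' < b + 1))]
    · rw [if_neg (by omega : ¬(i' = i ∧ j' = b)),
          if_neg (by omega : ¬(i' = i ∧ j' < b)),
          if_neg (by omega : ¬(i' = i ∧ j' < b + 1))]
-- outer i-loop of the bit==1 branch
theorem pvOuter1 (K O : Nat) :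
    ∀ (m : Nat) (g : Nat → Nat → Int), m ≤ K →
    (PySem.List.pyRange (m : Int) 0 (-1)).foldl
      (fun dp i => (PySem.List.pyRange ((O : Nat) : Int) 0 (-1)).foldl
        (fun dp j => pvSetL dp i j
          (PySem.Int.mod (pvGetL dp i j + pvGetL dp (i - 1) (j - 1)) pvMOD)) dp)
      (pvMk K O g)
    = pvMk K O (fun i' j' =>
        if 1 ≤ i' ∧ i' ≤ m ∧ 1 ≤ j' then
          PySem.Int.mod (g i' j' + g (i' - 1) (j' - 1)) pvMOD
        else g i' j') := by
  intro m
  induction m with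
  | zero =>
    intro g _
    rw [PySem.List.pyRange_neg_one_eq_nil (a := ((0 : Nat) : Int)) (b := 0) (by norm_num)]
    simp only [List.foldl_nil]
    exact pvMk_congr _ _ _ _ (fun i' _ j' _ => by rw [if_neg (by omega)])
  | succ m ih =>
    intro g hm
    rw [PySem.List.pyRange_neg_one_cons (a := ((m + 1 : Nat) : Int)) (b := 0)
          (by exact_mod_cast Nat.succ_pos m)]
    simp only [List.foldl_cons]
    have e1 : ((m + 1 : Nat) : Int) - 1 = ((m : Nat) : Int) := by push_cast; ring
    rw [pvInner1 K O (m + 1) (by omega) (by omega) O g le_rfl, e1, ih _ (by omega)]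
    refine pvMk_congr _ _ _ _ (fun i' hi' j' hj' => ?_)
    by_cases hj1 : 1 ≤ j'
    · by_cases hi0 : 1 ≤ i'
      · by_cases him : i' ≤ m
        · rw [if_pos (⟨hi0, him, hj1⟩ : 1 ≤ i' ∧ i' ≤ m ∧ 1 ≤ j'),
              if_pos (⟨hi0, by omega, hj1⟩ : 1 ≤ i' ∧ i' ≤ m + 1 ∧ 1 ≤ j'),
              if_neg (by omega : ¬(i' = m + 1 ∧ 1 ≤ j' ∧ j' ≤ O)),
              if_neg (by omega : ¬(i' - 1 = m + 1 ∧ 1 ≤ j' - 1 ∧ j' - 1 ≤ O))]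
        · by_cases him1 : i' = m + 1
          · rw [him1,
                if_neg (by omega : ¬(1 ≤ m + 1 ∧ m + 1 ≤ m ∧ 1 ≤ j')),
                if_pos (⟨rfl, hj1, hj'⟩ : m + 1 = m + 1 ∧ 1 ≤ j' ∧ j' ≤ O),
                if_pos (⟨by omega, le_refl _, hj1⟩ : 1 ≤ m + 1 ∧ m + 1 ≤ m + 1 ∧ 1 ≤ j')]
          · rw [if_neg (by omega : ¬(1 ≤ i' ∧ i' ≤ m ∧ 1 ≤ j')),
                if_neg (by omega : ¬(i' = m + 1 ∧ 1 ≤ j' ∧ j' ≤ O)),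
                if_neg (by omega : ¬(1 ≤ i' ∧ i' ≤ m + 1 ∧ 1 ≤ j'))]
      · rw [if_neg (by omega : ¬(1 ≤ i' ∧ i' ≤ m ∧ 1 ≤ j')),
            if_neg (by omega : ¬(i' = m + 1 ∧ 1 ≤ j' ∧ j' ≤ O)),
            if_neg (by omega : ¬(1 ≤ i' ∧ i' ≤ m + 1 ∧ 1 ≤ j'))]
    · rw [if_neg (by omega : ¬(1 ≤ i' ∧ i' ≤ m ∧ 1 ≤ j')),
          if_neg (by omega : ¬(i' = m + 1 ∧ 1 ≤ j' ∧ j' ≤ O)),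
          if_neg (by omega : ¬(1 ≤ i' ∧ i' ≤ m + 1 ∧ 1 ≤ j'))]

-- outer i-loop of the else branch
theorem pvOuter0 (K O : Nat) :
    ∀ (m : Nat) (g : Nat → Nat → Int), m ≤ K →
    (PySem.List.pyRange (m : Int) 0 (-1)).foldl
      (fun dp i => (PySem.List.pyRange 0 (((O : Nat) : Int) + 1) 1).foldl
        (fun dp j => pvSetL dp i j
          (PySem.Int.mod (pvGetL dp i j + pvGetL dp (i - 1) j) pvMOD)) dp)
      (pvMk K O g)
    = pvMk K O (fun i' j' =>
        if 1 ≤ i' ∧ i' ≤ m then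
          PySem.Int.mod (g i' j' + g (i' - 1) j') pvMOD
        else g i' j') := by
  intro m
  induction m with
  | zero =>
    intro g _
    rw [PySem.List.pyRange_neg_one_eq_nil (a := ((0 : Nat) : Int)) (b := 0) (by norm_num)]
    simp only [List.foldl_nil]
    exact pvMk_congr _ _ _ _ (fun i' _ j' _ => by rw [if_neg (by omega)])
  | succ m ih =>
    intro g hm
    rw [PySem.List.pyRange_neg_one_cons (a := ((m + 1 : Nat) : Int)) (b := 0)
          (by exact_mod_cast Nat.succ_pos m)]
    simp only [List.foldl_cons]
    have e1 : ((m + 1 : Nat) : Int) - 1 = ((m : Nat) : Int) := by push_cast; ring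
    have e2 : ((O : Nat) : Int) + 1 = ((O + 1 : Nat) : Int) := by push_cast; ring
    rw [e2, pvInner0 K O (m + 1) (by omega) (by omega) (O + 1) g le_rfl, ← e2, e1,
        ih _ (by omega)]
    refine pvMk_congr _ _ _ _ (fun i' hi' j' hj' => ?_)
    by_cases hi0 : 1 ≤ i'
    · by_cases him : i' ≤ m
      · rw [if_pos (⟨hi0, him⟩ : 1 ≤ i' ∧ i' ≤ m),
            if_pos (⟨hi0, by omega⟩ : 1 ≤ i' ∧ i' ≤ m + 1),
            if_neg (by omega : ¬(i' = m + 1 ∧ j' < O + 1)),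
            if_neg (by omega : ¬(i' - 1 = m + 1 ∧ j' < O + 1))]
      · by_cases him1 : i' = m + 1
        · rw [him1,
              if_neg (by omega : ¬(1 ≤ m + 1 ∧ m + 1 ≤ m)),
              if_pos (⟨rfl, by omega⟩ : m + 1 = m + 1 ∧ j' < O + 1),
              if_pos (⟨by omega, le_refl _⟩ : 1 ≤ m + 1 ∧ m + 1 ≤ m + 1)]
        · rw [if_neg (by omega : ¬(1 ≤ i' ∧ i' ≤ m)),
              if_neg (by omega : ¬(i' = m + 1 ∧ j' < O + 1)),
              if_neg (by omega : ¬(1 ≤ i' ∧ i' ≤ m + 1))]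
    · rw [if_neg (by omega : ¬(1 ≤ i' ∧ i' ≤ m)),
          if_neg (by omega : ¬(i' = m + 1 ∧ j' < O + 1)),
          if_neg (by omega : ¬(1 ≤ i' ∧ i' ≤ m + 1))]
theorem pvC_succ_left (o j : Nat) (hj : 1 ≤ j) : pvC (o + 1) j = pvC o (j - 1) + pvC o j := by
  obtain ⟨j0, rfl⟩ : ∃ j0, j = j0 + 1 := ⟨j - 1, by omega⟩
  unfold pvC
  rw [Nat.choose_succ_succ]
  push_cast
  simp

theorem pvE_pascal1 (o z i j : Nat) (hi : 1 ≤ i) (hj : 1 ≤ j) :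
    PySem.Int.mod (pvE o z i j + pvE o z (i - 1) (j - 1)) pvMOD = pvE (o + 1) z i j := by
  unfold pvE
  by_cases hji : j ≤ i
  · rw [if_pos hji, if_pos (by omega : j - 1 ≤ i - 1), if_pos hji,
        show i - 1 - (j - 1) = i - j by omega, pvMod_eq, ← Int.add_emod,
        pvC_succ_left o j hj]
    ring_nf
  · rw [if_neg hji, if_neg (by omega : ¬(j - 1 ≤ i - 1)), if_neg hji, pvMod_eq]
    simp
theorem pvE_unch1 (o z i j : Nat) (h : i = 0 ∨ j = 0) : pvE o z i j = pvE (o + 1) z i j := by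
  unfold pvE
  by_cases hj : j = 0
  · subst hj
    simp [pvC]
  · have hi : i = 0 := by omega
    subst hi
    rw [if_neg (by omega), if_neg (by omega)]

theorem pvC_succ_right (z t : Nat) : pvC (z + 1) (t + 1) = pvC z t + pvC z (t + 1) := by
  unfold pvC
  rw [Nat.choose_succ_succ]
  push_cast
  ring

theorem pvE_pascal0 (o z i j : Nat) (hi : 1 ≤ i) :
    PySem.Int.mod (pvE o z i j + pvE o z (i - 1) j) pvMOD = pvE o (z + 1) i j := by
  unfold pvE
  by_cases hji : j ≤ i - 1
  · rw [if_pos (by omega : j ≤ i), if_pos hji, if_pos (by omega : j ≤ i), pvMod_eq,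
        ← Int.add_emod, show i - j = (i - 1 - j) + 1 by omega,
        pvC_succ_right z (i - 1 - j)]
    ring_nf
  · by_cases hje : j ≤ i
    · rw [if_pos hje, if_neg hji, if_pos hje, pvMod_eq,
          show i - j = 0 by omega]
      simp [pvC]
    · rw [if_neg hje, if_neg hji, if_neg hje, pvMod_eq]
      simp
theorem pvE_unch0 (o z i j : Nat) (h : i = 0) : pvE o z i j = pvE o (z + 1) i j := by
  subst h
  unfold pvE
  by_cases hj : j = 0
  · subst hj
    simp [pvC]
  · rw [if_neg (by omega), if_neg (by omega)]

theorem pvStep1 (K O o z : Nat) :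
    (PySem.List.pyRange ((K : Nat) : Int) 0 (-1)).foldl
      (fun dp i => (PySem.List.pyRange ((O : Nat) : Int) 0 (-1)).foldl
        (fun dp j => pvSetL dp i j
          (PySem.Int.mod (pvGetL dp i j + pvGetL dp (i - 1) (j - 1)) pvMOD)) dp)
      (pvMk K O (pvE o z))
    = pvMk K O (pvE (o + 1) z) := by
  rw [pvOuter1 K O K (pvE o z) le_rfl]
  refine pvMk_congr _ _ _ _ (fun i' hi' j' hj' => ?_)
  by_cases h : 1 ≤ i' ∧ i' ≤ K ∧ 1 ≤ j'
  · rw [if_pos h]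
    exact pvE_pascal1 o z i' j' h.1 h.2.2
  · rw [if_neg h]
    exact pvE_unch1 o z i' j' (by omega)

theorem pvStep0 (K O o z : Nat) :
    (PySem.List.pyRange ((K : Nat) : Int) 0 (-1)).foldl
      (fun dp i => (PySem.List.pyRange 0 (((O : Nat) : Int) + 1) 1).foldl
        (fun dp j => pvSetL dp i j
          (PySem.Int.mod (pvGetL dp i j + pvGetL dp (i - 1) j) pvMOD)) dp)
      (pvMk K O (pvE o z))
    = pvMk K O (pvE o (z + 1)) := by
  rw [pvOuter0 K O K (pvE o z) le_rfl]
  refine pvMk_congr _ _ _ _ (fun i' hi' j' hj' => ?_)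
  by_cases h : 1 ≤ i' ∧ i' ≤ K
  · rw [if_pos h]
    exact pvE_pascal0 o z i' j' h.1
  · rw [if_neg h]
    exact pvE_unch0 o z i' j' (by omega)

theorem pvFold (K O : Nat) (bs : List Int) : ∀ (o z : Nat),
    bs.foldl (fun dp bit =>
      if bit == 1 then
        (PySem.List.pyRange ((K : Nat) : Int) 0 (-1)).foldl
          (fun dp i => (PySem.List.pyRange ((O : Nat) : Int) 0 (-1)).foldl
            (fun dp j => pvSetL dp i j
              (PySem.Int.mod (pvGetL dp i j + pvGetL dp (i - 1) (j - 1)) pvMOD)) dp) dp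
      else
        (PySem.List.pyRange ((K : Nat) : Int) 0 (-1)).foldl
          (fun dp i => (PySem.List.pyRange 0 (((O : Nat) : Int) + 1) 1).foldl
            (fun dp j => pvSetL dp i j
              (PySem.Int.mod (pvGetL dp i j + pvGetL dp (i - 1) j) pvMOD)) dp) dp)
      (pvMk K O (pvE o z))
    = pvMk K O (pvE (o + bs.count 1) (z + (bs.length - bs.count 1))) := by
  induction bs with
  | nil =>
    intro o z
    simp
  | cons x t ih =>
    intro o z
    have hcl := List.count_le_length (a := (1 : Int)) (l := t)
    simp only [List.foldl_cons]
    by_cases hx : x = 1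
    · rw [if_pos (by simp [hx]), pvStep1, ih (o + 1) z,
          show (o + 1) + t.count 1 = o + (x :: t).count 1 by
            simp [hx]; try omega,
          show z + (t.length - t.count 1) = z + ((x :: t).length - (x :: t).count 1) by
            simp [hx]; try omega]
    · rw [if_neg (by simp [hx]), pvStep0, ih o (z + 1),
          show o + t.count 1 = o + (x :: t).count 1 by
            simp [hx]; try omega,
          show (z + 1) + (t.length - t.count 1) = z + ((x :: t).length - (x :: t).count 1) by
            simp [hx]; try omega]
theorem pvInit (K O : Nat) :
    pvSetL (List.replicate (K + 1) (List.replicate (O + 1) (0 : Int))) 0 0 1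
      = pvMk K O (pvE 0 0) := by
  have hr : List.replicate (K + 1) (List.replicate (O + 1) (0 : Int))
      = pvMk K O (fun _ _ => 0) := by
    unfold pvMk
    apply List.ext_getElem
    · simp
    · intro n h1 h2
      simp
  rw [hr, pvMk_set' K O _ 0 0 1 (by omega) (by omega) (by omega) (by omega)]
  refine pvMk_congr _ _ _ _ (fun i' hi' j' hj' => ?_)
  unfold pvE pvC
  by_cases hj : j' = 0
  · subst hj
    by_cases hi : i' = 0
    · subst hi
      simp
      decide
    · rw [if_pos (by omega : (0:Nat) ≤ i'), if_neg (by simp [Int.toNat_zero]; omega)]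
      simp [Nat.choose_eq_zero_of_lt (show 0 < i' by omega)]
  · rw [if_neg (by simp [Int.toNat_zero]; omega)]
    by_cases hji : j' ≤ i'
    · rw [if_pos hji]
      simp [Nat.choose_eq_zero_of_lt (show 0 < j' by omega)]
    · rw [if_neg hji]

theorem pvInitA (K O : Nat) :
    pvSetDP (Array.replicate (K + 1) (Array.replicate (O + 1) (0 : Int))) 0 0 1
      = pvConv (pvMk K O (pvE 0 0)) := by
  rw [show Array.replicate (K + 1) (Array.replicate (O + 1) (0 : Int))
        = pvConv (List.replicate (K + 1) (List.replicate (O + 1) 0)) by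
      simp [pvConv, List.map_replicate],
    pvConv_set, pvInit]

theorem pvStepComm1 (t : List (List Int)) (i x : Int) :
    pvSetDP (pvConv t) i x
        (PySem.Int.mod (pvGetDP (pvConv t) i x + pvGetDP (pvConv t) (i - 1) (x - 1)) pvMOD)
      = pvConv (pvSetL t i x
          (PySem.Int.mod (pvGetL t i x + pvGetL t (i - 1) (x - 1)) pvMOD)) := by
  rw [pvConv_get, pvConv_get, pvConv_set]

theorem pvStepComm0 (t : List (List Int)) (i x : Int) :
    pvSetDP (pvConv t) i x
        (PySem.Int.mod (pvGetDP (pvConv t) i x + pvGetDP (pvConv t) (i - 1) x) pvMOD)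
      = pvConv (pvSetL t i x
          (PySem.Int.mod (pvGetL t i x + pvGetL t (i - 1) x) pvMOD)) := by
  rw [pvConv_get, pvConv_get, pvConv_set]

theorem pvFoldComm (bs : List Int) (rI rJ1 rJ0 : List Int) :
    ∀ t : List (List Int),
    bs.foldl (fun dp bit =>
        if bit == 1 then
          rI.foldl (fun dp i => rJ1.foldl
            (fun dp j => pvSetDP dp i j
              (PySem.Int.mod (pvGetDP dp i j + pvGetDP dp (i - 1) (j - 1)) pvMOD)) dp) dp
        else
          rI.foldl (fun dp i => rJ0.foldl
            (fun dp j => pvSetDP dp i j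
              (PySem.Int.mod (pvGetDP dp i j + pvGetDP dp (i - 1) j) pvMOD)) dp) dp)
      (pvConv t)
    = pvConv (bs.foldl (fun dp bit =>
        if bit == 1 then
          rI.foldl (fun dp i => rJ1.foldl
            (fun dp j => pvSetL dp i j
              (PySem.Int.mod (pvGetL dp i j + pvGetL dp (i - 1) (j - 1)) pvMOD)) dp) dp
        else
          rI.foldl (fun dp i => rJ0.foldl
            (fun dp j => pvSetL dp i j
              (PySem.Int.mod (pvGetL dp i j + pvGetL dp (i - 1) j) pvMOD)) dp) dp)
      t) := by
  refine pvConv_fold _ _ _ (fun t x => ?_)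
  by_cases hx : x == 1
  · rw [if_pos hx, if_pos hx]
    exact pvConv_fold rI _ _
      (fun t i => pvConv_fold rJ1 _ _ (fun t' j => pvStepComm1 t' i j) t) t
  · rw [if_neg hx, if_neg hx]
    exact pvConv_fold rI _ _
      (fun t i => pvConv_fold rJ0 _ _ (fun t' j => pvStepComm0 t' i j) t) t

theorem pvBinom (N : Nat) : ∀ (m : Nat), m ≤ N →
    (PySem.List.pyRange 0 ((m : Nat) : Int) 1).foldl
      (fun rc t =>
        let c := PySem.Int.floordiv (rc.2 * (((N : Nat) : Int) - t)) (t + 1)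
        (rc.1 ++ [c], c))
      ([1], 1)
    = ((List.range (m + 1)).map (fun j => pvC N j), pvC N m) := by
  intro m
  induction m with
  | zero =>
    intro _
    rw [PySem.List.pyRange_one_eq_nil (by norm_num)]
    simp [pvC]
  | succ m ih =>
    intro hm
    rw [show ((m + 1 : Nat) : Int) = ((m : Nat) : Int) + 1 by push_cast; ring,
        PySem.List.pyRange_one_succ_right (by positivity), List.foldl_append,
        ih (by omega)]
    simp only [List.foldl_cons, List.foldl_nil]
    have hstep : PySem.Int.floordiv (pvC N m * (((N : Nat) : Int) - ((m : Nat) : Int)))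
        (((m : Nat) : Int) + 1) = pvC N (m + 1) := by
      have hid : pvC N m * (((N : Nat) : Int) - ((m : Nat) : Int))
          = pvC N (m + 1) * (((m : Nat) : Int) + 1) := by
        unfold pvC
        have hc := Nat.choose_succ_right_eq N m
        zify [Nat.le_of_succ_le hm] at hc
        linarith
      rw [hid, PySem.Int.floordiv_eq_ediv_of_pos (by positivity),
          Int.mul_ediv_cancel _ (by positivity)]
    rw [hstep,
        show List.range (m + 1 + 1) = List.range (m + 1) ++ [m + 1] from List.range_succ,
        List.map_append]
    simp

theorem pvBinomRow_eq (N : Nat) :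
    pvBinomRow ((N : Nat) : Int) = (List.range (N + 1)).map (fun j => pvC N j) := by
  unfold pvBinomRow
  rw [pvBinom N N le_rfl]

theorem pvSumMod (l : List Int) (f g : Int → Int)
    (h : ∀ x ∈ l, f x % pvMOD = g x % pvMOD) :
    (l.map f).sum % pvMOD = (l.map g).sum % pvMOD := by
  induction l with
  | nil => rfl
  | cons x t ih =>
    simp only [List.map_cons, List.sum_cons]
    rw [Int.add_emod, h x (List.mem_cons_self), ih (fun y hy => h y (List.mem_cons_of_mem _ hy)),
        ← Int.add_emod]
-- ===== VERDICT (by name: the statement is the Claim_ definition above) =====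
theorem count_valid_subsequences_spec : Claim_equal_count_valid_subsequences := by
  intro bs k hdom hpre
  unfold Pre_count_valid_subsequences at hpre
  unfold Spec_count_valid_subsequences
  obtain ⟨K, rfl⟩ : ∃ K : Nat, k = (K : Int) := ⟨k.toNat, by omega⟩
  unfold count_valid_subsequences count_valid_subsequences_alt
  dsimp only
  rw [PySem.List.count_eq]
  have hOle : List.count 1 bs ≤ bs.length := List.count_le_length
  have hzcast : ((bs.length : Int) - ((List.count 1 bs : Nat) : Int))
      = ((bs.length - List.count 1 bs : Nat) : Int) := by push_cast [hOle]; ring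
  have hmo : 0 ≤ PySem.Int.floordiv (((K : Nat) : Int) + 1) 2 :=
    (PySem.Int.le_floordiv_iff_mul_le (by norm_num)).2 (by omega)
  rw [max_eq_left hmo, hzcast,
      show (((K : Nat) : Int) + 1).toNat = K + 1 by omega,
      show (((List.count 1 bs : Nat) : Int) + 1).toNat = List.count 1 bs + 1 by omega,
      pvInitA K (List.count 1 bs),
      pvFoldComm bs _ _ _ (pvMk K (List.count 1 bs) (pvE 0 0)),
      pvFold K (List.count 1 bs) bs 0 0]
  simp only [Nat.zero_add, pvConv_get]
  rw [PySem.List.foldl_add,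
      show (fun (s j : Int) =>
          if 0 ≤ ((K : Nat) : Int) - j ∧ ((K : Nat) : Int) - j ≤ ((bs.length - List.count 1 bs : Nat) : Int) then
            s + PySem.Int.mod ((pvBinomRow ((List.count 1 bs : Nat) : Int)).getD j.toNat 0) pvMOD *
                PySem.Int.mod ((pvBinomRow ((bs.length - List.count 1 bs : Nat) : Int)).getD (((K : Nat) : Int) - j).toNat 0) pvMOD
          else s)
        = fun (s j : Int) =>
            s + (if 0 ≤ ((K : Nat) : Int) - j ∧ ((K : Nat) : Int) - j ≤ ((bs.length - List.count 1 bs : Nat) : Int) then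
              PySem.Int.mod ((pvBinomRow ((List.count 1 bs : Nat) : Int)).getD j.toNat 0) pvMOD *
                PySem.Int.mod ((pvBinomRow ((bs.length - List.count 1 bs : Nat) : Int)).getD (((K : Nat) : Int) - j).toNat 0) pvMOD
            else 0) from
        funext fun s => funext fun j => by split_ifs <;> simp,
      PySem.List.foldl_add, pvMod_eq, pvMod_eq, zero_add, zero_add]
  refine pvSumMod _ _ _ (fun j hj => ?_)
  rw [PySem.List.mem_pyRange_one] at hj
  have hj0 : 0 ≤ j := le_trans hmo hj.1
  have hjO : j.toNat ≤ List.count 1 bs := by omega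
  rw [pvMk_getD' K (List.count 1 bs) _ ((K : Nat) : Int) j (by omega) (le_refl _) hj0 (by omega),
      Int.toNat_natCast, pvBinomRow_eq, pvBinomRow_eq]
  by_cases hcond : 0 ≤ ((K : Nat) : Int) - j ∧ ((K : Nat) : Int) - j ≤ ((bs.length - List.count 1 bs : Nat) : Int)
  · rw [if_pos hcond,
        pvMapRange_getD _ _ _ (by omega : j.toNat < List.count 1 bs + 1),
        pvMapRange_getD _ _ _ (by omega : (((K : Nat) : Int) - j).toNat < (bs.length - List.count 1 bs) + 1),
        show (((K : Nat) : Int) - j).toNat = K - j.toNat by omega]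
    unfold pvE
    rw [if_pos (by omega : j.toNat ≤ K), Int.emod_emod_of_dvd _ dvd_rfl, pvMod_eq, pvMod_eq,
        ← Int.mul_emod]
  · rw [if_neg hcond]
    unfold pvE
    by_cases hjK : j.toNat ≤ K
    · have hz : pvC (bs.length - List.count 1 bs) (K - j.toNat) = 0 := by
        unfold pvC
        rw [Nat.choose_eq_zero_of_lt (by omega)]
        simp
      rw [if_pos hjK, hz]
      simp
    · rw [if_neg hjK]
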